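-- pv_equiv track=rewrite | github.com/airbytehq/airbyte | airbyte-integrations/connectors/source-fortnox/source_fortnox/helper.py | signal_last
-- ===== SOURCE A (Python) =====
-- from collections.abc import Iterable
-- from typing import Any, Tuple
--
-- def signal_last(it: Iterable[Any]) -> Iterable[Tuple[bool, Any]]:
--     """
--     Helper method that wraps an iterator returns a tuple with the original
--     element in the wrapped iterator as well as a boolean indicating
--     if we are currently on the last iteration
--     """
--     try:
--         iterable = iter(it)
--         ret_var = next(iterable)
--         for val in iterable:
--             yield False, ret_var
--             ret_var = val
--         yield True, ret_var
--     except StopIteration: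
--         yield from ()
-- ===== SOURCE B (Python) =====
-- def signal_last(it):
--     buf = list(it)
--     n = len(buf)
--     for i, x in enumerate(buf):
--         yield i == n - 1, x
-- ===== Notes on version B (the rewrite author's own statement) =====
-- stated objective: simpler
-- what changed: B materializes the iterable into a list and yields (i == n-1, x) by position via enumerate, removing A's one-element lookahead with next()/StopIteration handling.
import Mathlib
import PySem

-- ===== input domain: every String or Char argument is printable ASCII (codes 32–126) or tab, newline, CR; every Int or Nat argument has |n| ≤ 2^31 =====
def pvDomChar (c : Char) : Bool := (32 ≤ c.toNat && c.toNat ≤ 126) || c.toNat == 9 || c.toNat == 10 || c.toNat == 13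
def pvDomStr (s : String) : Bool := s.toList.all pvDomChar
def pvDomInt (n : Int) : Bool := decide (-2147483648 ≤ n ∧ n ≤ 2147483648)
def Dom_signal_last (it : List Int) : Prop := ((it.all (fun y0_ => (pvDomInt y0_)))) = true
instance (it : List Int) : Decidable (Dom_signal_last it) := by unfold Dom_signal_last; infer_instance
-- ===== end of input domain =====

-- B replaces A's one-element-lookahead streaming (next()/StopIteration) with an eager
-- list plus an index comparison per position (objective: simpler).
-- Both Pythons are generators; equivalence is about the produced sequence of tuples.
-- ===== PORT A =====
-- A: grab the first element with next(); for each further val yield (False, held), hold val;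
-- finally yield (True, held). StopIteration on the empty input yields nothing.
def signalLastLoop (ret_var : Int) (rest : List Int) : List (Bool × Int) :=
  match rest with
  | [] => [(true, ret_var)]
  | val :: vs => (false, ret_var) :: signalLastLoop val vs

def signal_last (it : List Int) : List (Bool × Int) :=
  match it with
  | [] => []                       -- next() raises StopIteration; 'yield from ()' yields nothing
  | r :: rest => signalLastLoop r rest

-- ===== PORT B =====
def signal_last_alt (it : List Int) : List (Bool × Int) :=
  (PySem.List.enumerate it).map (fun p => (decide (p.1 = (it.length : Int) - 1), p.2))

-- ===== PRECONDITION & SPEC =====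
def Spec_signal_last (it : List Int) (out : List (Bool × Int)) : Prop := out = signal_last_alt it
instance (it : List Int) (out : List (Bool × Int)) : Decidable (Spec_signal_last it out) := by unfold Spec_signal_last; infer_instance

-- ===== CLAIM (what is proved, stated in full; the proofs are below) =====
def Claim_equal_signal_last : Prop := ∀ (it : List Int), Dom_signal_last it → Spec_signal_last it (signal_last it)

-- ===== LEMMAS AND PROOFS =====

-- ===== VERDICT (by name: the statement is the Claim_ definition above) =====
theorem signal_last_loop_eq (r : Int) (rest : List Int) (s : Int) :
    signalLastLoop r rest =
      (PySem.List.enumerate (r :: rest) s).map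
        (fun p => (decide (p.1 = s + (rest.length : Int)), p.2)) := by
  induction rest generalizing r s with
  | nil => simp [signalLastLoop, PySem.List.enumerate_cons, PySem.List.enumerate_nil]
  | cons v vs ih =>
      rw [signalLastLoop, PySem.List.enumerate_cons, List.map_cons, ih v (s + 1)]
      congr 1
      · simp only [Prod.mk.injEq, and_true]
        symm
        simp only [decide_eq_false_iff_not]
        simp only [List.length_cons]; push_cast; omega
      · apply List.map_congr_left
        intro p _
        have h : s + 1 + (vs.length : Int) = s + ((v :: vs).length : Int) := by
          simp only [List.length_cons]; push_cast; omega
        rw [h]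

theorem signal_last_spec : Claim_equal_signal_last := by
  intro it _
  unfold Spec_signal_last
  cases it with
  | nil => simp [signal_last, signal_last_alt, PySem.List.enumerate_nil]
  | cons r rest =>
      show signalLastLoop r rest = _
      rw [signal_last_loop_eq r rest 0, signal_last_alt]
      apply List.map_congr_left
      intro p _
      have h : (0 : Int) + (rest.length : Int) = ((r :: rest).length : Int) - 1 := by
        simp only [List.length_cons]; push_cast; omega
      rw [h]
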